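-- pv_equiv track=rewrite | github.com/slay1379/algorithm | 프로그래머스/3/152995. 인사고과/인사고과.py | solution
-- ===== SOURCE A (Python) =====
-- def solution(scores):
--     wanho = scores[0]
--     sum_wanho = sum(wanho)
--
--     scores.sort(key=lambda x : (-x[0],x[1]))
--
--     new = []
--     max_peer = 0
--
--     for work,peer in scores:
--         if peer < max_peer:
--             if [work,peer] == wanho:
--                 return -1
--         else:
--             if peer > max_peer:
--                 max_peer = peer
--             new.append(work+peer)
--     new.sort(reverse=True)
--     for i in range(len(new)):
--         if new[i] == sum_wanho:
--             return i+1
-- ===== SOURCE B (Python) =====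
-- def solution(scores):
--     # A person is excluded from the ranking when their peer score is below the
--     # running peer maximum over everyone with strictly more work points (the
--     # maximum starts from 0, as in the sweep formulation of the rule).
--     def peer_bar(work):
--         return max([0] + [b for a, b in scores if a > work])
--
--     w0, w1 = scores[0]
--     if w1 < peer_bar(w0):
--         return -1
--     target = w0 + w1
--     return 1 + sum(1 for a, b in scores if a + b > target and b >= peer_bar(a))
-- ===== Notes on version B (the rewrite author's own statement) =====
-- stated objective: alternative
-- what changed: B removes both sorts and the sweep entirely: it decides each person's exclusion directly by comparing their peer score against the 0-floored maximum peer score over people with strictly more work points, and counts surviving sums above Wanho's, trading A's O(n log n) pipeline for a sort-free O(n^2) double scan.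
import Mathlib
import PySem

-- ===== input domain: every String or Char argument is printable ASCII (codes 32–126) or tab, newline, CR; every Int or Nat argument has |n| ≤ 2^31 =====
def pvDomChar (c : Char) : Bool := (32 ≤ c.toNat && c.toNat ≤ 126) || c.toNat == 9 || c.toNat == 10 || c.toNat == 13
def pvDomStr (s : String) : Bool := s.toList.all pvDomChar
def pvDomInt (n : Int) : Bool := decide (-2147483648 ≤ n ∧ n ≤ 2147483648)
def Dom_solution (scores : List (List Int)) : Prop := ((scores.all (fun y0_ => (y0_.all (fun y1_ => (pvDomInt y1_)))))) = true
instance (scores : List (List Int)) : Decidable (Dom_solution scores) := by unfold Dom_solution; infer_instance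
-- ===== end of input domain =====

-- B drops A's sort-sweep-collect-sort-scan pipeline entirely: it tests each person directly
-- against the peer bar (max peer score, floored at 0, over people with strictly more work)
-- and counts how many surviving sums beat Wanho's (objective: alternative, O(n^2) vs O(n log n)).
-- Python A sorts `scores` in place (B does not); the claim is about the return value only.

-- ===== PORT A =====
-- the for-loop over the sorted list: returns none when A returns -1, else `some new`
def solLoopA (wanho : List Int) (l : List (List Int)) (neww : List Int) (maxPeer : Int) : Option (List Int) :=
  match l with
  | [] => some neww
  | row :: rest =>
    let work := PySem.List.pyGetD row 0 0   -- unpacking `work, peer = row`; Pre_ guarantees row.length = 2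
    let peer := PySem.List.pyGetD row 1 0
    if peer < maxPeer then
      if [work, peer] = wanho then none
      else solLoopA wanho rest neww maxPeer
    else
      solLoopA wanho rest (neww ++ [work + peer]) (if maxPeer < peer then peer else maxPeer)

-- `for i in range(len(new)): if new[i] == sum_wanho: return i+1`; the fall-through returns Python None,
-- which is unreachable under Pre_ (proved on the way to solution_spec); 0 here is a placeholder for it
def solScanA (l : List Int) (target : Int) (i : Int) : Int :=
  match l with
  | [] => 0
  | x :: rest => if x = target then i + 1 else solScanA rest target (i + 1)

def solution (scores : List (List Int)) : Int :=
  let wanho := PySem.List.pyGetD scores 0 []   -- scores[0]; Pre_ excludes scores = []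
  let sumWanho := wanho.sum
  let order := PySem.List.sorted2 scores (fun x => -(PySem.List.pyGetD x 0 0)) (fun x => PySem.List.pyGetD x 1 0) false
  match solLoopA wanho order [] 0 with
  | none => -1
  | some neww => solScanA (PySem.List.sorted neww (fun x => x) true) sumWanho 0

-- ===== PORT B =====
-- max([0] + [b for a, b in scores if a > work]); Python's max of the cons list is the
-- running-max fold over its tail (PySem.List.max?_id_cons), which is exact here
def peerBar (scores : List (List Int)) (work : Int) : Int :=
  ((scores.filter (fun r => decide (work < PySem.List.pyGetD r 0 0))).map
    (fun r => PySem.List.pyGetD r 1 0)).foldl max 0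

def solution_alt (scores : List (List Int)) : Int :=
  let w := PySem.List.pyGetD scores 0 []
  let w0 := PySem.List.pyGetD w 0 0
  let w1 := PySem.List.pyGetD w 1 0
  if w1 < peerBar scores w0 then -1
  else
    1 + ((scores.countP (fun r =>
        decide (w0 + w1 < PySem.List.pyGetD r 0 0 + PySem.List.pyGetD r 1 0) &&
        decide (peerBar scores (PySem.List.pyGetD r 0 0) ≤ PySem.List.pyGetD r 1 0))) : Int)

-- ===== PRECONDITION & SPEC =====
-- Pre_ excludes exactly the inputs where Python A raises: the empty list (scores[0] → IndexError)
-- and rows that are not pairs (`work, peer = row` → ValueError / the sort key → IndexError)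
def Pre_solution (scores : List (List Int)) : Prop :=
  scores ≠ [] ∧ ∀ row ∈ scores, row.length = 2
instance (scores : List (List Int)) : Decidable (Pre_solution scores) := by unfold Pre_solution; infer_instance
def pvWitness_solution : List (List Int) := [[2, 2], [1, 4], [3, 2], [3, 2], [2, 1]]

def Spec_solution (scores : List (List Int)) (out : Int) : Prop := out = solution_alt scores
instance (scores : List (List Int)) (out : Int) : Decidable (Spec_solution scores out) := by unfold Spec_solution; infer_instance

-- ===== CLAIM (what is proved, stated in full; the proofs are below) =====
def Claim_equal_solution : Prop := ∀ (scores : List (List Int)), Dom_solution scores → Pre_solution scores → Spec_solution scores (solution scores)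

-- ===== LEMMAS AND PROOFS =====

-- proof-side abbreviations for the two components of a row
def g0 (r : List Int) : Int := PySem.List.pyGetD r 0 0
def g1 (r : List Int) : Int := PySem.List.pyGetD r 1 0

-- "person (x, y) is cut": y below 0 or strictly dominated by someone in sc
def cutB (sc : List (List Int)) (x y : Int) : Bool :=
  decide (y < 0) || sc.any (fun r => decide (x < g0 r ∧ y < g1 r))

-- the sort order A establishes: work descending, peer ascending within equal work
def lexLe (x y : List Int) : Prop := g0 y < g0 x ∨ (g0 x = g0 y ∧ g1 x ≤ g1 y)

theorem lt_foldl_max_iff (l : List Int) : ∀ (a y : Int),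
    y < l.foldl max a ↔ y < a ∨ ∃ s ∈ l, y < s := by
  induction l with
  | nil => intro a y; simp [List.foldl]
  | cons x t ih =>
    intro a y
    simp only [List.foldl, ih (max a x) y, List.mem_cons]
    constructor
    · rintro (h | ⟨s, hs, hy⟩)
      · rcases lt_max_iff.mp h with h | h
        · exact Or.inl h
        · exact Or.inr ⟨x, Or.inl rfl, h⟩
      · exact Or.inr ⟨s, Or.inr hs, hy⟩
    · rintro (h | ⟨s, hs | hs, hy⟩)
      · exact Or.inl (lt_max_of_lt_left h)
      · exact Or.inl (by subst hs; exact lt_max_of_lt_right hy)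
      · exact Or.inr ⟨s, hs, hy⟩

theorem lt_peerBar_iff (sc : List (List Int)) (x y : Int) :
    y < peerBar sc x ↔ cutB sc x y = true := by
  unfold peerBar cutB
  rw [lt_foldl_max_iff]
  simp only [Bool.or_eq_true, List.any_eq_true, decide_eq_true_eq, List.mem_map,
    List.mem_filter, g0, g1]
  constructor
  · rintro (h | ⟨s, ⟨r, ⟨hr, hx⟩, rfl⟩, hy⟩)
    · exact Or.inl h
    · exact Or.inr ⟨r, hr, hx, hy⟩
  · rintro (h | ⟨r, hr, hx, hy⟩)
    · exact Or.inl h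
    · exact Or.inr ⟨PySem.List.pyGetD r 1 0, ⟨r, ⟨hr, hx⟩, rfl⟩, hy⟩

theorem cutB_perm {L sc : List (List Int)} (h : L.Perm sc) (x y : Int) :
    cutB L x y = cutB sc x y := by
  unfold cutB
  rw [h.any_eq]

-- pairwise order of foldl-insertBy sorting, for a relation that is asymmetric and
-- "transitive across non-inversions"
theorem pairwise_insertBy {α : Type} (before : α → α → Bool)
    (hasym : ∀ a b, before a b = true → before b a = false)
    (htr : ∀ a b c, before a b = true → before c b = false → before c a = false)
    (x : α) (l : List α) (h : l.Pairwise (fun a b => before b a = false)) :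
    (PySem.List.insertBy before x l).Pairwise (fun a b => before b a = false) := by
  induction l with
  | nil => simp [PySem.List.insertBy]
  | cons y ys ih =>
    rw [List.pairwise_cons] at h
    by_cases hb : before x y = true
    · show (if before x y = true then x :: y :: ys else y :: PySem.List.insertBy before x ys).Pairwise _
      rw [if_pos hb]
      refine List.pairwise_cons.mpr ⟨?_, List.pairwise_cons.mpr ⟨h.1, h.2⟩⟩
      intro z hz
      rcases List.mem_cons.mp hz with rfl | hz
      · exact hasym _ _ hb
      · exact htr _ _ _ hb (h.1 z hz)
    · show (if before x y = true then x :: y :: ys else y :: PySem.List.insertBy before x ys).Pairwise _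
      rw [if_neg hb]
      refine List.pairwise_cons.mpr ⟨?_, ih h.2⟩
      intro z hz
      rcases (PySem.List.mem_insertBy before x z ys).mp hz with rfl | hz
      · exact Bool.eq_false_iff.mpr hb
      · exact h.1 z hz

theorem pairwise_foldl_insertBy {α : Type} (before : α → α → Bool)
    (hasym : ∀ a b, before a b = true → before b a = false)
    (htr : ∀ a b c, before a b = true → before c b = false → before c a = false)
    (xs : List α) : ∀ (acc : List α), acc.Pairwise (fun a b => before b a = false) →
    (xs.foldl (fun acc x => PySem.List.insertBy before x acc) acc).Pairwise
      (fun a b => before b a = false) := by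
  induction xs with
  | nil => intro acc h; simpa [List.foldl]
  | cons x t ih =>
    intro acc h
    exact ih _ (pairwise_insertBy before hasym htr x acc h)

-- the list A sorts is pairwise in the (work desc, peer asc) order
theorem sorted2_lexLe (scores : List (List Int)) :
    (PySem.List.sorted2 scores (fun x => -(PySem.List.pyGetD x 0 0))
      (fun x => PySem.List.pyGetD x 1 0) false).Pairwise lexLe := by
  have h := pairwise_foldl_insertBy
    (fun a b => decide (-(PySem.List.pyGetD a 0 0) < -(PySem.List.pyGetD b 0 0)) ||
      (!decide (-(PySem.List.pyGetD b 0 0) < -(PySem.List.pyGetD a 0 0)) &&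
        decide (PySem.List.pyGetD a 1 0 < PySem.List.pyGetD b 1 0)))
    (by
      intro a b hab
      simp only [Bool.or_eq_true, Bool.and_eq_true, Bool.not_eq_true', decide_eq_true_eq,
        decide_eq_false_iff_not, Bool.or_eq_false_iff, Bool.and_eq_false_iff,
        Bool.not_eq_false'] at hab ⊢
      omega)
    (by
      intro a b c hab hcb
      simp only [Bool.or_eq_true, Bool.and_eq_true, Bool.not_eq_true', decide_eq_true_eq,
        decide_eq_false_iff_not, Bool.or_eq_false_iff, Bool.and_eq_false_iff,
        Bool.not_eq_false'] at hab hcb ⊢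
      omega)
    scores [] List.Pairwise.nil
  have he : PySem.List.sorted2 scores (fun x => -(PySem.List.pyGetD x 0 0))
      (fun x => PySem.List.pyGetD x 1 0) false =
      scores.foldl (fun acc x => PySem.List.insertBy
        (fun a b => decide (-(PySem.List.pyGetD a 0 0) < -(PySem.List.pyGetD b 0 0)) ||
          (!decide (-(PySem.List.pyGetD b 0 0) < -(PySem.List.pyGetD a 0 0)) &&
            decide (PySem.List.pyGetD a 1 0 < PySem.List.pyGetD b 1 0))) x acc) [] := rfl
  rw [he]
  refine h.imp ?_
  intro a b hab
  simp only [Bool.or_eq_false_iff, Bool.and_eq_false_iff, Bool.not_eq_false',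
    decide_eq_false_iff_not, decide_eq_true_eq] at hab
  unfold lexLe g0 g1
  omega

-- with the list sorted, "peer below the running prefix max" is exactly "cut"
theorem cut_iff_lt_prefmax (L pre suf : List (List Int)) (r : List Int)
    (hL : L = pre ++ r :: suf) (hpw : L.Pairwise lexLe) :
    (g1 r < (pre.map g1).foldl max 0) ↔ cutB L (g0 r) (g1 r) = true := by
  subst hL
  rw [lt_foldl_max_iff]
  have hsplit := List.pairwise_append.mp hpw
  have hpre : ∀ p ∈ pre, lexLe p r := fun p hp => hsplit.2.2 p hp r List.mem_cons_self
  have hsuf : ∀ s ∈ suf, lexLe r s := fun s hs => (List.pairwise_cons.mp hsplit.2.1).1 s hs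
  unfold cutB
  simp only [Bool.or_eq_true, List.any_eq_true, decide_eq_true_eq]
  constructor
  · rintro (h | ⟨s, hs, hy⟩)
    · exact Or.inl h
    · obtain ⟨p, hp, rfl⟩ := List.mem_map.mp hs
      rcases hpre p hp with h0 | ⟨h0, h1⟩
      · exact Or.inr ⟨p, by simp [hp], h0, hy⟩
      · omega
  · rintro (h | ⟨s, hs, hx, hy⟩)
    · exact Or.inl h
    · right
      refine ⟨g1 s, List.mem_map.mpr ⟨s, ?_, rfl⟩, hy⟩
      rcases (List.mem_append.mp hs) with h | h
      · exact h
      · rcases List.mem_cons.mp h with rfl | h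
        · omega
        · rcases hsuf s h with h0 | ⟨h0, h1⟩ <;> omega

-- the accumulated list only grows at the tail
theorem solLoopA_shift (w : List Int) (l : List (List Int)) :
    ∀ (neww : List Int) (mp : Int),
      solLoopA w l neww mp = (solLoopA w l [] mp).map (fun d => neww ++ d) := by
  induction l with
  | nil => intro neww mp; simp [solLoopA]
  | cons row rest ih =>
    intro neww mp
    simp only [solLoopA, List.nil_append]
    by_cases h1 : PySem.List.pyGetD row 1 0 < mp
    · by_cases h2 : [PySem.List.pyGetD row 0 0, PySem.List.pyGetD row 1 0] = w
      · simp [h1, h2]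
      · simp only [if_pos h1, if_neg h2]
        exact ih neww mp
    · simp only [if_neg h1]
      generalize (if mp < PySem.List.pyGetD row 1 0 then PySem.List.pyGetD row 1 0 else mp) = mp'
      rw [ih (neww ++ [_]) mp', ih [_] mp']
      cases solLoopA w rest [] mp' with
      | none => rfl
      | some d => simp

-- A's sweep over the sorted list, characterised by the cut predicate
theorem sweep (w : List Int) (L : List (List Int)) (hpw : L.Pairwise lexLe) :
    ∀ (suf pre : List (List Int)) (mp : Int), L = pre ++ suf →
      mp = (pre.map g1).foldl max 0 →
      solLoopA w suf [] mp =
        (if suf.any (fun r => cutB L (g0 r) (g1 r) && decide ([g0 r, g1 r] = w)) then none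
         else some ((suf.filter (fun r => !cutB L (g0 r) (g1 r))).map (fun r => g0 r + g1 r))) := by
  intro suf
  induction suf with
  | nil => intro pre mp _ _; simp [solLoopA]
  | cons r rest ih =>
    intro pre mp hL hmp
    have hL' : L = (pre ++ [r]) ++ rest := by rw [hL]; simp
    have hcut : (g1 r < mp) ↔ cutB L (g0 r) (g1 r) = true := by
      rw [hmp]; exact cut_iff_lt_prefmax L pre rest r hL hpw
    have hfold : ((pre ++ [r]).map g1).foldl max 0 = max ((pre.map g1).foldl max 0) (g1 r) := by
      simp [List.foldl_append]
    simp only [solLoopA, List.nil_append]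
    by_cases h1 : PySem.List.pyGetD r 1 0 < mp
    · have hc : cutB L (g0 r) (g1 r) = true := hcut.mp h1
      by_cases h2 : [PySem.List.pyGetD r 0 0, PySem.List.pyGetD r 1 0] = w
      · rw [if_pos h1, if_pos h2]
        have : (r :: rest).any (fun r => cutB L (g0 r) (g1 r) && decide ([g0 r, g1 r] = w)) = true := by
          simp only [List.any_cons, Bool.or_eq_true, Bool.and_eq_true]
          exact Or.inl ⟨hc, decide_eq_true h2⟩
        rw [if_pos this]
      · rw [if_pos h1, if_neg h2]
        have h1' : g1 r < mp := h1
        have hmp' : mp = ((pre ++ [r]).map g1).foldl max 0 := by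
          rw [hfold, ← hmp, max_eq_left (le_of_lt h1')]
        rw [ih (pre ++ [r]) mp hL' hmp']
        have hc' : cutB L (PySem.List.pyGetD r 0 0) (PySem.List.pyGetD r 1 0) = true := hc
        simp [List.any_cons, hc', g0, g1, h2]
    · have hc : cutB L (g0 r) (g1 r) = false := by
        cases hb : cutB L (g0 r) (g1 r) with
        | false => rfl
        | true => exact absurd (hcut.mpr hb) h1
      rw [if_neg h1]
      have hmp' : (if mp < PySem.List.pyGetD r 1 0 then PySem.List.pyGetD r 1 0 else mp)
          = ((pre ++ [r]).map g1).foldl max 0 := by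
        rw [hfold, ← hmp]
        split_ifs with h
        · exact (max_eq_right (le_of_lt h)).symm
        · exact (max_eq_left (not_lt.mp h)).symm
      rw [solLoopA_shift, hmp', ih (pre ++ [r]) _ hL' rfl]
      simp only [List.any_cons, List.filter_cons, hc, Bool.not_false, if_true, List.map_cons]
      cases hb : rest.any (fun r => cutB L (g0 r) (g1 r) && decide ([g0 r, g1 r] = w)) with
      | false => simp [g0, g1]
      | true => simp

-- on a descending list containing the target, A's index scan returns i + 1 + (count of elements above the target)
theorem solScanA_eq (t : Int) (l : List Int) :
    ∀ (i : Int), l.Pairwise (fun x y => y ≤ x) → t ∈ l →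
      solScanA l t i = i + 1 + ((l.countP (fun s => t < s)) : Int) := by
  induction l with
  | nil => intro i _ h; exact absurd h (by simp)
  | cons x rest ih =>
    intro i hpw hmem
    have hle : ∀ y ∈ rest, y ≤ x := fun y hy => (List.pairwise_cons.mp hpw).1 y hy
    by_cases h1 : x = t
    · subst h1
      have h0 : rest.countP (fun s => decide (x < s)) = 0 := by
        rw [List.countP_eq_zero]
        intro y hy
        simp only [decide_eq_true_eq]
        have := hle y hy
        omega
      simp [solScanA, h0]
    · have htr : t ∈ rest := by
        rcases List.mem_cons.mp hmem with h | h
        · exact absurd h.symm h1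
        · exact h
      have hlt : t < x := lt_of_le_of_ne (hle t htr) (fun he => h1 he.symm)
      simp only [solScanA, if_neg h1, List.countP_cons, hlt, decide_true]
      rw [ih (i + 1) (List.pairwise_cons.mp hpw).2 htr]
      push_cast
      ring

-- ===== VERDICT (by name: the statement is the Claim_ definition above) =====
theorem solution_spec : Claim_equal_solution := by
  intro scores _ hpre
  obtain ⟨hne, hlen⟩ := hpre
  obtain ⟨w, tl, rfl⟩ : ∃ w tl, scores = w :: tl := by
    cases scores with
    | nil => exact absurd rfl hne
    | cons w tl => exact ⟨w, tl, rfl⟩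
  obtain ⟨a, b, rfl⟩ : ∃ a b, w = [a, b] := by
    have := hlen w (List.mem_cons_self)
    match w, this with
    | [a, b], _ => exact ⟨a, b, rfl⟩
  unfold Spec_solution solution solution_alt
  have e1 : PySem.List.pyGetD ([a, b] : List Int) 1 0 = b := rfl
  have e2 : ([a, b] : List Int).sum = a + b := by simp
  simp only [PySem.List.pyGetD_zero_cons, e1, e2]
  have hperm : (PySem.List.sorted2 (([a, b] : List Int) :: tl)
      (fun x => -(PySem.List.pyGetD x 0 0)) (fun x => PySem.List.pyGetD x 1 0) false).Perm
      (([a, b] : List Int) :: tl) := PySem.List.sorted2_perm _ _ _ _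
  set L := PySem.List.sorted2 (([a, b] : List Int) :: tl)
      (fun x => -(PySem.List.pyGetD x 0 0)) (fun x => PySem.List.pyGetD x 1 0) false with hLdef
  have hpw : L.Pairwise lexLe := sorted2_lexLe _
  have hmemL : ([a, b] : List Int) ∈ L := hperm.mem_iff.mpr List.mem_cons_self
  have hg0 : g0 ([a, b] : List Int) = a := rfl
  have hg1 : g1 ([a, b] : List Int) = b := rfl
  have hbar : ∀ x y : Int, (y < peerBar (([a, b] : List Int) :: tl) x) ↔ cutB L x y = true := by
    intro x y
    rw [lt_peerBar_iff, cutB_perm hperm]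
  rw [sweep ([a, b] : List Int) L hpw L [] 0 (by simp) (by simp)]
  cases hcond : L.any (fun r => cutB L (g0 r) (g1 r) && decide ([g0 r, g1 r] = ([a, b] : List Int))) with
  | true =>
    obtain ⟨r, hr, hfr⟩ := List.any_eq_true.mp hcond
    rw [Bool.and_eq_true, decide_eq_true_eq] at hfr
    obtain ⟨hcr, heq⟩ := hfr
    simp only [List.cons.injEq, and_true] at heq
    obtain ⟨h0, h1⟩ := heq
    have hcab : cutB L a b = true := by rw [← h0, ← h1]; exact hcr
    rw [if_pos ((hbar a b).mpr hcab)]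
    rfl
  | false =>
    have hncut : cutB L a b = false := by
      cases hb : cutB L a b with
      | false => rfl
      | true =>
        have : L.any (fun r => cutB L (g0 r) (g1 r) && decide ([g0 r, g1 r] = ([a, b] : List Int))) = true :=
          List.any_eq_true.mpr ⟨[a, b], hmemL, by simp [hg0, hg1, hb]⟩
        rw [hcond] at this
        exact absurd this (by simp)
    have hnbar : ¬ (b < peerBar (([a, b] : List Int) :: tl) a) := by
      rw [hbar a b, hncut]; simp
    rw [if_neg hnbar, if_neg Bool.false_ne_true]
    set new := (L.filter (fun r => !cutB L (g0 r) (g1 r))).map (fun r => g0 r + g1 r) with hnew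
    show solScanA (PySem.List.sorted new (fun x => x) true) (a + b) 0 = _
    have hsum : a + b ∈ new := by
      refine List.mem_map.mpr ⟨[a, b], List.mem_filter.mpr ⟨hmemL, by rw [hg0, hg1, hncut]; rfl⟩, ?_⟩
      simp [hg0, hg1]
    have hpwd : (PySem.List.sorted new (fun x => x) true).Pairwise (fun x y => y ≤ x) := by
      have := PySem.List.sorted_pairwise_rev new (fun x => x)
      simpa using this
    have hmem' : a + b ∈ PySem.List.sorted new (fun x => x) true :=
      (PySem.List.mem_sorted _ _ _ _).mpr hsum
    rw [solScanA_eq _ _ 0 hpwd hmem']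
    have hc1 : (PySem.List.sorted new (fun x => x) true).countP
        (fun s => decide (a + b < s)) =
        new.countP (fun s => decide (a + b < s)) :=
      (PySem.List.sorted_perm new (fun x => x) true).countP_eq _
    have hc2 : new.countP (fun s => decide (a + b < s)) =
        L.countP (fun r => decide (a + b < g0 r + g1 r) && !cutB L (g0 r) (g1 r)) := by
      rw [hnew, List.countP_map, List.countP_filter]
      rfl
    have hc3 : L.countP (fun r => decide (a + b < g0 r + g1 r) && !cutB L (g0 r) (g1 r)) =
        (([a, b] : List Int) :: tl).countP (fun r =>
          decide (a + b < PySem.List.pyGetD r 0 0 + PySem.List.pyGetD r 1 0) &&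
          decide (peerBar (([a, b] : List Int) :: tl) (PySem.List.pyGetD r 0 0) ≤ PySem.List.pyGetD r 1 0)) := by
      rw [hperm.countP_eq]
      refine List.countP_congr ?_
      intro r _
      simp only [Bool.and_eq_true, decide_eq_true_eq, Bool.not_eq_true', g0, g1]
      have hb2 := hbar (PySem.List.pyGetD r 0 0) (PySem.List.pyGetD r 1 0)
      constructor
      · rintro ⟨hs, hcf⟩
        refine ⟨hs, ?_⟩
        by_contra hlt
        simp [hb2.mp (not_le.mp hlt)] at hcf
      · rintro ⟨hs, hle⟩
        refine ⟨hs, ?_⟩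
        cases hb : cutB L (PySem.List.pyGetD r 0 0) (PySem.List.pyGetD r 1 0) with
        | false => rfl
        | true => exact absurd (hb2.mpr hb) (not_lt.mpr hle)
    rw [hc1, hc2, hc3]
    push_cast
    omega
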